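-- pv_equiv track=rewrite | github.com/cse001/pincer-search | pincer.py | recovery
-- ===== SOURCE A (Python) =====
-- def recovery(ck , mfs,k):
--     print ("The recovery")
--     ck1 = []
--     for c in ck:
--         for m in mfs:
--             tempC = c[:k-1]
--             tempM = m[:k-1]
--             if tempC == tempM:
--                 tempCk = tempC.copy()
--                 for i in range(k,len(m)):
--                     ck1.append(m[i])
--     return ck1.copy()
-- ===== SOURCE B (Python) =====
-- def recovery(ck, mfs, k):
--     # Faster re-implementation: index mfs by its (k-1)-prefix once, then one pass over ck.
--     print("The recovery")
--     tails = {}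
--     for m in mfs:
--         key = tuple(m[:k - 1])
--         tails.setdefault(key, []).extend(m[k:])
--     out = []
--     for c in ck:
--         out.extend(tails.get(tuple(c[:k - 1]), []))
--     return out
-- ===== Notes on version B (the rewrite author's own statement) =====
-- stated objective: faster
-- what changed: Replaces A's nested scan (every ck item compared against every mfs item, with an index loop re-reading m) by a dict built in one pass over mfs that maps each (k-1)-prefix to the concatenation of its members' tails, followed by one lookup per ck item.
-- outside the precondition, e.g. on recovery([[1]], [[1, 2]], -1): A returns [2, 1, 2], B returns [2]
import Mathlib
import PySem

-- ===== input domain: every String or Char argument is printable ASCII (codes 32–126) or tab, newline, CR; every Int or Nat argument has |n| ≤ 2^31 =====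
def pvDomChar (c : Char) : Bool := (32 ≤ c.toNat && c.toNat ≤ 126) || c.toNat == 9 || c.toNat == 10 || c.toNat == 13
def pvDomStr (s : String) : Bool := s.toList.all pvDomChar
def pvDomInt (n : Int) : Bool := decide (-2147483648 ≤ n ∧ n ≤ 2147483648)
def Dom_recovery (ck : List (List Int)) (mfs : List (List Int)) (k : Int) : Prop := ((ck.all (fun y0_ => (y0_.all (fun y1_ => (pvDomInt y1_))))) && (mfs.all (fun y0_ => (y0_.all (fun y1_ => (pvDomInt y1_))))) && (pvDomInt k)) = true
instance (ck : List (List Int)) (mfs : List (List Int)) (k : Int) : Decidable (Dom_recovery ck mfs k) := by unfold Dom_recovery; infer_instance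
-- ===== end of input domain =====

-- B indexes mfs by its (k-1)-prefix in a dict built in one pass, then does one lookup per ck item
-- (asymptotically faster than A's nested scan); A's 'print' side effect is not modelled (return value only).


-- ===== PORT A =====
-- 'print' (side effect) and the dead assignment 'tempCk = tempC.copy()' are not modelled.
-- m[i] (IndexError when out of range) is ported as pyGetD m i 0: under Pre_recovery (0 ≤ k)
-- every index i ∈ range(k, len(m)) is in range, so the default is never used.
def recovery (ck : List (List Int)) (mfs : List (List Int)) (k : Int) : List Int :=
  let ck1 : List Int := []
  let ck1 := ck.foldl (fun ck1 c =>
    mfs.foldl (fun ck1 m =>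
      let tempC := PySem.List.slice c none (some (k - 1))
      let tempM := PySem.List.slice m none (some (k - 1))
      if tempC == tempM then
        (PySem.List.pyRange k (PySem.List.len m) 1).foldl
          (fun ck1 i => ck1 ++ [PySem.List.pyGetD m i 0]) ck1
      else ck1) ck1) ck1
  ck1

-- ===== PORT B =====
def recovery_alt (ck : List (List Int)) (mfs : List (List Int)) (k : Int) : List Int :=
  -- tails.setdefault(key, []).extend(m[k:])  ==  tails[key] = tails.get(key, []) + m[k:]  ==  Dict.modify
  let tails : PySem.Dict (List Int) (List Int) := mfs.foldl (fun d m =>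
      d.modify (PySem.List.slice m none (some (k - 1))) []
        (· ++ PySem.List.slice m (some k) none)) PySem.Dict.empty
  ck.foldl (fun out c =>
    out ++ tails.getD (PySem.List.slice c none (some (k - 1))) []) []

-- ===== PRECONDITION & SPEC =====
-- Pre_ excludes negative k (outside the algorithm's natural domain of level indices): there A
-- raises IndexError whenever some prefix-matching m has len(m) < -k, and otherwise its value
-- comes from negative-index wraparound (m[-1], m[0], … are appended).
def Pre_recovery (ck : List (List Int)) (mfs : List (List Int)) (k : Int) : Prop := 0 ≤ k
instance (ck : List (List Int)) (mfs : List (List Int)) (k : Int) : Decidable (Pre_recovery ck mfs k) := by unfold Pre_recovery; infer_instance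
def pvWitness_recovery : List (List Int) × List (List Int) × Int := ([[1, 2, 3], [1, 4]], [[1, 2, 5], [1, 9, 9], [2, 2]], 2)

def Spec_recovery (ck : List (List Int)) (mfs : List (List Int)) (k : Int) (out : List Int) : Prop := out = recovery_alt ck mfs k
instance (ck : List (List Int)) (mfs : List (List Int)) (k : Int) (out : List Int) : Decidable (Spec_recovery ck mfs k out) := by unfold Spec_recovery; infer_instance

-- ===== CLAIM (what is proved, stated in full; the proofs are below) =====
def Claim_equal_recovery : Prop := ∀ (ck : List (List Int)) (mfs : List (List Int)) (k : Int), Dom_recovery ck mfs k → Pre_recovery ck mfs k → Spec_recovery ck mfs k (recovery ck mfs k)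

-- ===== LEMMAS AND PROOFS =====

-- a lookup in the grouping dict B builds is the concatenation of the tails of the matching m's
theorem getD_groupDict (key tail : List Int → List Int) (l : List (List Int))
    (d : PySem.Dict (List Int) (List Int)) (c : List Int) :
    (l.foldl (fun d m => d.modify (key m) [] (· ++ tail m)) d).getD c [] =
      d.getD c [] ++ (l.filter (fun m => key m == c)).flatMap tail := by
  induction l generalizing d with
  | nil => simp
  | cons m l ih =>
    simp only [List.foldl_cons, ih, List.filter_cons]
    rw [PySem.Dict.getD_modify]
    by_cases h : c = key m
    · simp [h]
    · simp [h, Ne.symm h]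

-- A's inner index loop appends exactly m[k:] (0 ≤ k)
theorem inner_loop_eq_drop (m : List Int) (k : Int) (hk : 0 ≤ k) (acc : List Int) :
    (PySem.List.pyRange k (PySem.List.len m) 1).foldl
      (fun ck1 i => ck1 ++ [PySem.List.pyGetD m i 0]) acc = acc ++ m.drop k.toNat := by
  rw [PySem.List.foldl_pyRange_pyGetD m 0 (fun acc x => acc ++ [x]) acc hk,
    PySem.List.foldl_append_singleton_eq_self]

-- flatMap with an if against the empty list is flatMap over the filtered list
theorem flatMap_ite_eq_filter (p : List Int → Bool) (f : List Int → List Int) (l : List (List Int)) :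
    l.flatMap (fun m => if p m then f m else []) = (l.filter p).flatMap f := by
  induction l with
  | nil => simp
  | cons m l ih =>
    by_cases h : p m <;> simp [h, ih]

-- ===== VERDICT (by name: the statement is the Claim_ definition above) =====
theorem recovery_spec : Claim_equal_recovery := by
  intro ck mfs k _ hk
  unfold Spec_recovery recovery recovery_alt
  simp only
  apply PySem.List.foldl_congr_mem
  intro acc c _
  rw [getD_groupDict, PySem.Dict.getD_empty, List.nil_append]
  rw [PySem.List.foldl_congr_mem (g := fun ck1 m =>
    ck1 ++ (if PySem.List.slice m none (some (k - 1)) ==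
        PySem.List.slice c none (some (k - 1)) then m.drop k.toNat else []))]
  · rw [PySem.List.foldl_append_eq_flatMap, flatMap_ite_eq_filter]
    congr 1
    apply List.flatMap_congr
    intro m _
    rw [PySem.List.slice_from m hk]
  · intro acc' m _
    rw [inner_loop_eq_drop m k hk]
    by_cases h : PySem.List.slice c none (some (k - 1)) = PySem.List.slice m none (some (k - 1))
    · simp [h]
    · simp [h, Ne.symm h]
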